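-- pv_equiv track=rewrite | github.com/Miguel235711/CompetitiveProgrammingAndMore | Competitive Programming 3/Section 1.4/Game (Chess)/255 - Correct Move/Python/main.py | validMov
-- ===== SOURCE A (Python) =====
-- def colMov(a,b):
--     return a//8==b//8
--
-- def getInc(Q,newQ):
--     inc=0
--     if (newQ-Q) %8 == 0:
--         inc = 8
--     elif colMov(Q,newQ):
--         inc = 1
--     return inc
--
-- def validMov(Q,newQ,K):
--     if Q > newQ:
--         Q,newQ=newQ,Q
--     inc = getInc(Q,newQ)
--     if inc == 0:
--         return False
--     while Q<=newQ:
--         if Q==K: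
--             return False
--         Q+=inc
--     return True
-- ===== SOURCE B (Python) =====
-- def validMov(Q, newQ, K):
--     lo, hi = (Q, newQ) if Q <= newQ else (newQ, Q)
--     if (hi - lo) % 8 == 0:
--         inc = 8
--     elif lo // 8 == hi // 8:
--         inc = 1
--     else:
--         return False
--     return not (lo <= K <= hi and (K - lo) % inc == 0)
-- ===== Notes on version B (the rewrite author's own statement) =====
-- stated objective: simpler
-- what changed: Replaces A's step-by-step while-loop scan of every square on the rook's path with a single closed-form arithmetic membership test (lo <= K <= hi and (K-lo) % inc == 0).
import Mathlib
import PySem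

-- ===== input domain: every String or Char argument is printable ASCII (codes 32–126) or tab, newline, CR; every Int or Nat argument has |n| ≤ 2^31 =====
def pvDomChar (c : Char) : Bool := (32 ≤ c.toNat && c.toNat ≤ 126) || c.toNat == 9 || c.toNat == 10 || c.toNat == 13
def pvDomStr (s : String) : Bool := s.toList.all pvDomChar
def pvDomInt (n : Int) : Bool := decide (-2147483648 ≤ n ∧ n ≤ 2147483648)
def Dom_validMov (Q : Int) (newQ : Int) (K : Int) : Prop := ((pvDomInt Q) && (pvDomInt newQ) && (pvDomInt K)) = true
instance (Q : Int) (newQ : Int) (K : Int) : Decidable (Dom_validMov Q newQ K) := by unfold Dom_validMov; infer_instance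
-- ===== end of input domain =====

-- B replaces A's square-by-square while-loop scan of the rook's path with a single
-- closed-form arithmetic membership test (objective: simpler, O(1) instead of O(path length)).

-- ===== PORT A =====
def colMov (a : Int) (b : Int) : Bool :=
  PySem.Int.floordiv a 8 == PySem.Int.floordiv b 8

def getInc (Q : Int) (newQ : Int) : Int :=
  if PySem.Int.mod (newQ - Q) 8 == 0 then 8
  else if colMov Q newQ then 1
  else 0

-- termination fact the loop port cites (Python's loop terminates because inc > 0 once inc ≠ 0)
theorem getInc_pos (Q : Int) (newQ : Int) (h : ¬ getInc Q newQ = 0) : 0 < getInc Q newQ := by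
  unfold getInc at *; split_ifs at * <;> omega

def validMovLoop (newQ : Int) (K : Int) (inc : Int) (hinc : 0 < inc) (Q : Int) : Bool :=
  if _h : Q ≤ newQ then
    if Q == K then false else validMovLoop newQ K inc hinc (Q + inc)
  else true
termination_by (newQ + 1 - Q).toNat
decreasing_by omega

def validMov (Q : Int) (newQ : Int) (K : Int) : Bool :=
  let p := if Q > newQ then (newQ, Q) else (Q, newQ)
  if h : getInc p.1 p.2 = 0 then false
  else validMovLoop p.2 K (getInc p.1 p.2) (getInc_pos p.1 p.2 h) p.1

-- ===== PORT B =====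
def validMov_alt (Q : Int) (newQ : Int) (K : Int) : Bool :=
  let lo := if Q ≤ newQ then Q else newQ
  let hi := if Q ≤ newQ then newQ else Q
  if PySem.Int.mod (hi - lo) 8 == 0 then
    !(decide (lo ≤ K) && decide (K ≤ hi) && (PySem.Int.mod (K - lo) 8 == 0))
  else if PySem.Int.floordiv lo 8 == PySem.Int.floordiv hi 8 then
    !(decide (lo ≤ K) && decide (K ≤ hi) && (PySem.Int.mod (K - lo) 1 == 0))
  else false

-- ===== PRECONDITION & SPEC =====
def Spec_validMov (Q : Int) (newQ : Int) (K : Int) (out : Bool) : Prop := out = validMov_alt Q newQ K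
instance (Q : Int) (newQ : Int) (K : Int) (out : Bool) : Decidable (Spec_validMov Q newQ K out) := by unfold Spec_validMov; infer_instance

-- ===== CLAIM (what is proved, stated in full; the proofs are below) =====
def Claim_equal_validMov : Prop := ∀ (Q : Int) (newQ : Int) (K : Int), Dom_validMov Q newQ K → Spec_validMov Q newQ K (validMov Q newQ K)

-- ===== LEMMAS AND PROOFS =====

-- The loop visits exactly lo, lo+inc, lo+2*inc, … ≤ newQ; it returns false iff K is one of them.
theorem validMovLoop_eq (newQ K inc : Int) (hinc : 0 < inc) (Q : Int) :
    validMovLoop newQ K inc hinc Q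
      = !(decide (Q ≤ K) && decide (K ≤ newQ) && decide ((K - Q) % inc = 0)) := by
  by_cases hle : Q ≤ newQ
  · rw [validMovLoop]
    by_cases hk : Q = K
    · simp [hk]
    · have ih := validMovLoop_eq newQ K inc hinc (Q + inc)
      simp only [hle, dif_pos, hk, beq_iff_eq, ih]
      by_cases hmod : (K - Q) % inc = 0
      · have hd : inc ∣ K - Q := Int.dvd_of_emod_eq_zero hmod
        obtain ⟨m, hm⟩ := hd
        have hmod' : (K - (Q + inc)) % inc = 0 := by
          have : K - (Q + inc) = (K - Q) - inc := by ring
          rw [this, Int.sub_emod_right, hmod]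
        have hstep : (Q + inc ≤ K) ↔ (Q ≤ K) := by
          constructor
          · intro h; omega
          · intro h
            have hQK : Q < K := lt_of_le_of_ne h hk
            have hm1 : 1 ≤ m := by nlinarith
            nlinarith
        simp [hmod, hmod', hstep]
      · have hmod' : ¬ (K - (Q + inc)) % inc = 0 := by
          have : K - (Q + inc) = (K - Q) - inc := by ring
          rw [this, Int.sub_emod_right]; exact hmod
        simp [hmod, hmod']
  · rw [validMovLoop]
    simp only [hle, dif_neg, not_false_iff]
    have : ¬ (Q ≤ K ∧ K ≤ newQ) := by omega
    simp only [Bool.and_assoc]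
    simp
    omega
termination_by (newQ + 1 - Q).toNat
decreasing_by omega

-- A's ordered-pair body equals B's ordered-pair body.
theorem core (lo hi K : Int) :
    (if h : getInc lo hi = 0 then false
     else validMovLoop hi K (getInc lo hi) (getInc_pos lo hi h) lo)
    =
    (if PySem.Int.mod (hi - lo) 8 == 0 then
      !(decide (lo ≤ K) && decide (K ≤ hi) && (PySem.Int.mod (K - lo) 8 == 0))
    else if PySem.Int.floordiv lo 8 == PySem.Int.floordiv hi 8 then
      !(decide (lo ≤ K) && decide (K ≤ hi) && (PySem.Int.mod (K - lo) 1 == 0))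
    else false) := by
  by_cases h8 : (hi - lo) % 8 = 0
  · have hg : getInc lo hi = 8 := by unfold getInc; simp [h8]
    simp only [hg]
    rw [dif_neg (by norm_num), validMovLoop_eq]
    have hdv : ((K - lo) % 8 == 0) = decide ((8:Int) ∣ K - lo) := by
      by_cases hd : (8:Int) ∣ K - lo
      · simp [hd, Int.emod_eq_zero_of_dvd hd]
      · have hne : ¬ (K - lo) % 8 = 0 := fun h => hd (Int.dvd_of_emod_eq_zero h)
        simp [hd, hne]
    simp [h8, hdv]
  · by_cases hcol : lo / 8 = hi / 8
    · have hg : getInc lo hi = 1 := by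
        unfold getInc colMov; simp [h8, hcol]
      simp only [hg]
      rw [dif_neg one_ne_zero, validMovLoop_eq]
      simp [h8, hcol]
    · have hg : getInc lo hi = 0 := by
        unfold getInc colMov; simp [h8, hcol]
      simp [hg, h8, hcol]

-- ===== VERDICT (by name: the statement is the Claim_ definition above) =====
theorem validMov_spec : Claim_equal_validMov := by
  intro Q newQ K _
  unfold Spec_validMov validMov validMov_alt
  by_cases h : Q > newQ
  · simp only [h, if_pos, if_neg (by omega : ¬ Q ≤ newQ)]
    exact core newQ Q K
  · simp only [h, if_neg, if_pos (by omega : Q ≤ newQ), not_false_iff]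
    exact core Q newQ K
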